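-- pv_equiv track=rewrite | github.com/shadow578/homeassistant_sma-ennexos | custom_components/sma_ennexos/util.py | channel_parts_to_entity_id
-- ===== SOURCE A (Python) =====
-- def channel_parts_to_entity_id(component_id: str, channel_id: str, kind: str) -> str:
--     """Convert a channel_id and component_id to an entity id.
--
--     :param component_id: The component_id of the channel.
--     :param channel_id: The channel_id of the channel.
--     :param kind: The kind of entity. e.g. sensor, binary_sensor, etc.
--     :return: entity id
--     """
--
--     # transform array index to be just a suffix
--     if channel_id.endswith("]"):
--         channel_id = channel_id.replace("[", "_").replace("]", "")
--
--     # concat component and channel id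
--     s = f"{component_id}_{channel_id}"
--
--     # lower case
--     s = s.lower()
--
--     # replace "delimiting characters" and spaces with underscores
--     for c in " -.:":
--         s = s.replace(c, "_")
--
--     # remove all non-alphanumeric characters except underscores
--     s = "".join(c if c.isalnum() or c == "_" else "" for c in s)
--
--     # trim underscores from start and end
--     s = s.strip("_")
--
--     # remove all occurrences of multiple underscores
--     while "__" in s:
--         s = s.replace("__", "_")
--
--     return f"{kind}.{s}"
-- ===== SOURCE B (Python) =====
-- def channel_parts_to_entity_id(component_id: str, channel_id: str, kind: str) -> str:
--     """Single-pass variant: one scan with a pending-separator flag replaces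
--     the four replaces, the delete-comprehension, the strip and the '__' collapse."""
--     if channel_id.endswith("]"):
--         channel_id = channel_id.replace("[", "_").replace("]", "")
--     s = f"{component_id}_{channel_id}".lower()
--     out = []
--     pending = False
--     for c in s:
--         if c.isalnum():
--             if pending and out:
--                 out.append("_")
--             out.append(c)
--             pending = False
--         elif c in " -.:_":
--             pending = True
--     return f"{kind}.{''.join(out)}"
-- ===== Notes on version B (the rewrite author's own statement) =====
-- stated objective: alternative
-- what changed: The four full-string replace passes, the delete-comprehension, the '_'-strip and the repeated '__'-collapse loop are fused into one left-to-right scan that keeps a pending-separator flag and emits '_' only between emitted alphanumeric characters.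
import Mathlib
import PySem

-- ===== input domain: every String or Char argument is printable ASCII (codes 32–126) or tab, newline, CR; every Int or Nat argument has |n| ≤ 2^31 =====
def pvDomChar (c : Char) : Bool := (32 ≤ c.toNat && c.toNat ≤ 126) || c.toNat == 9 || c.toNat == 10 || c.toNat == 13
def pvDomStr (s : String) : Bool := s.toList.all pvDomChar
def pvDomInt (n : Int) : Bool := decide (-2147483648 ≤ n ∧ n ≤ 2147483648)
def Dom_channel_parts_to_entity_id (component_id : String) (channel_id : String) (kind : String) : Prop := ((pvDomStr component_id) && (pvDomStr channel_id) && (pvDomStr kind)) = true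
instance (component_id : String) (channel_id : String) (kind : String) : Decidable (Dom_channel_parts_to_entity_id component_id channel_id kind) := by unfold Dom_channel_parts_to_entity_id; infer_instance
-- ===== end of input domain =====

-- B is one left-to-right scan with a pending-separator flag replacing A's four replace passes,
-- delete-comprehension, strip and repeated '__'-collapse loop (objective: alternative single-pass algorithm).

-- ===== PORT A =====
-- helpers needed by the port's termination proof (cited by name in decreasing_by):
-- pvRep is the one-pass effect of s.replace("__", "_"), used only to justify that A's while-loop terminates.
def pvRep : List Char → List Char
  | [] => []
  | [c] => [c]
  | c :: d :: t => if c = '_' ∧ d = '_' then '_' :: pvRep t else c :: pvRep (d :: t)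
termination_by s => s.length

theorem pvRep_go (fuel : Nat) : ∀ (l acc : List Char), l.length ≤ fuel →
    PySem.Chars.replace.go ['_', '_'] ['_'] fuel l acc = acc.reverse ++ pvRep l := by
  induction fuel with
  | zero =>
    intro l acc h
    have : l = [] := List.eq_nil_of_length_eq_zero (Nat.le_zero.mp h)
    subst this
    simp [PySem.Chars.replace.go, pvRep]
  | succ n ih =>
    intro l acc h
    match l with
    | [] => simp [PySem.Chars.replace.go, pvRep]
    | [c] =>
      rw [PySem.Chars.replace.go]
      have hpre : List.isPrefixOf ['_','_'] [c] = false := by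
        simp [List.isPrefixOf]
      rw [hpre]
      simp only [Bool.false_eq_true, if_false]
      rw [ih [] (c :: acc) (by simp)]
      simp [pvRep]
    | c :: d :: t =>
      rw [PySem.Chars.replace.go]
      by_cases hcd : c = '_' ∧ d = '_'
      · obtain ⟨rfl, rfl⟩ := hcd
        have hpre : List.isPrefixOf ['_','_'] ('_' :: '_' :: t) = true := by
          simp [List.isPrefixOf]
        simp only [hpre, if_true]
        rw [show (List.drop ['_','_'].length ('_' :: '_' :: t)) = t from rfl]
        rw [ih t (['_'].reverse ++ acc) (by simp at h ⊢; omega)]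
        simp [pvRep]
      · have hpre : List.isPrefixOf ['_','_'] (c :: d :: t) = false := by
          simp only [List.isPrefixOf, Bool.and_true, Bool.and_eq_false_imp, beq_iff_eq,
            beq_eq_false_iff_ne, ne_eq]
          intro hc hd
          exact hcd ⟨hc.symm, hd.symm⟩
        simp only [hpre, Bool.false_eq_true, if_false]
        rw [ih (d :: t) (c :: acc) (by simp at h ⊢; omega)]
        rw [pvRep]
        simp [hcd]

theorem pv_replace_underscore (s : List Char) :
    PySem.Chars.replace s ['_', '_'] ['_'] = pvRep s := by
  rw [PySem.Chars.replace]
  simp [pvRep_go s.length s [] le_rfl]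

theorem pvRep_length_le (s : List Char) : (pvRep s).length ≤ s.length := by
  fun_induction pvRep s with
  | case1 => simp
  | case2 c => simp
  | case3 c d t h ih => simp only [List.length_cons]; omega
  | case4 c d t h ih => simp only [List.length_cons] at ih ⊢; omega

theorem pvRep_length_lt (s : List Char) (h : ['_','_'] <:+: s) :
    (pvRep s).length < s.length := by
  fun_induction pvRep s with
  | case1 => simp at h
  | case2 c =>
    have := h.length_le
    simp at this
  | case3 c d t hcd ih =>
    have := pvRep_length_le t
    simp only [List.length_cons]
    omega
  | case4 c d t hcd ih =>
    have h' : ['_','_'] <:+: (d :: t) := by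
      rcases (List.infix_cons_iff).mp h with h1 | h2
      · rcases List.cons_prefix_cons.mp h1 with ⟨rfl, h1'⟩
        rcases List.cons_prefix_cons.mp h1' with ⟨rfl, _⟩
        exact absurd ⟨rfl, rfl⟩ hcd
      · exact h2
    have := ih h'
    simp only [List.length_cons] at this ⊢
    omega

-- A's while-"__"-loop, verbatim: keep replacing "__" by "_" while "__" occurs.
def pvCollapse (s : List Char) : List Char :=
  if h : PySem.Chars.isIn ['_', '_'] s = true then
    pvCollapse (PySem.Chars.replace s ['_', '_'] ['_'])
  else s
termination_by s.length
decreasing_by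
  rw [pv_replace_underscore]
  exact pvRep_length_lt s ((PySem.Chars.isIn_iff_infix _ _).mp h)

def channel_parts_to_entity_id_chars (component_id : List Char) (channel_id : List Char) (kind : List Char) : List Char :=
  let channel_id := if PySem.Chars.endswith channel_id [']'] = true then
      PySem.Chars.replace (PySem.Chars.replace channel_id ['['] ['_']) [']'] []
    else channel_id
  let s := component_id ++ ['_'] ++ channel_id
  let s := PySem.Chars.lower s
  let s := PySem.Chars.replace s [' '] ['_']
  let s := PySem.Chars.replace s ['-'] ['_']
  let s := PySem.Chars.replace s ['.'] ['_']
  let s := PySem.Chars.replace s [':'] ['_']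
  let s := PySem.Chars.join [] (s.map (fun c => if PySem.Chars.isalnum c || c == '_' then [c] else []))
  let s := PySem.Chars.stripChars s ['_']
  let s := pvCollapse s
  kind ++ ['.'] ++ s

def channel_parts_to_entity_id (component_id : String) (channel_id : String) (kind : String) : String :=
  String.ofList (channel_parts_to_entity_id_chars component_id.toList channel_id.toList kind.toList)

-- ===== PORT B =====
-- one step of B's single scan: state = (out, pending)
def pvScanStep (st : List Char × Bool) (c : Char) : List Char × Bool :=
  if PySem.Chars.isalnum c then
    ((if st.2 && !st.1.isEmpty then st.1 ++ ['_'] else st.1) ++ [c], false)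
  else if PySem.Chars.isIn [c] [' ', '-', '.', ':', '_'] then (st.1, true)
  else st

def channel_parts_to_entity_id_alt_chars (component_id : List Char) (channel_id : List Char) (kind : List Char) : List Char :=
  let channel_id := if PySem.Chars.endswith channel_id [']'] = true then
      PySem.Chars.replace (PySem.Chars.replace channel_id ['['] ['_']) [']'] []
    else channel_id
  let s := PySem.Chars.lower (component_id ++ ['_'] ++ channel_id)
  let out := (s.foldl pvScanStep ([], false)).1
  kind ++ ['.'] ++ PySem.Chars.join [] (out.map (fun c => [c]))

def channel_parts_to_entity_id_alt (component_id : String) (channel_id : String) (kind : String) : String :=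
  String.ofList (channel_parts_to_entity_id_alt_chars component_id.toList channel_id.toList kind.toList)

-- ===== PRECONDITION & SPEC =====
def Spec_channel_parts_to_entity_id (component_id : String) (channel_id : String) (kind : String) (out : String) : Prop := out = channel_parts_to_entity_id_alt component_id channel_id kind
instance (component_id : String) (channel_id : String) (kind : String) (out : String) : Decidable (Spec_channel_parts_to_entity_id component_id channel_id kind out) := by unfold Spec_channel_parts_to_entity_id; infer_instance

-- ===== CLAIM (what is proved, stated in full; the proofs are below) =====
def Claim_equal_channel_parts_to_entity_id : Prop := ∀ (component_id : String) (channel_id : String) (kind : String), Dom_channel_parts_to_entity_id component_id channel_id kind → Spec_channel_parts_to_entity_id component_id channel_id kind (channel_parts_to_entity_id component_id channel_id kind)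

-- ===== LEMMAS AND PROOFS =====

-- single-character replace is a flatMap
theorem pv_replace_single_go (a : Char) (new : List Char) (fuel : Nat) :
    ∀ (l acc : List Char), l.length ≤ fuel →
    PySem.Chars.replace.go [a] new fuel l acc =
      acc.reverse ++ l.flatMap (fun c => if c = a then new else [c]) := by
  induction fuel with
  | zero =>
    intro l acc h
    have : l = [] := List.eq_nil_of_length_eq_zero (Nat.le_zero.mp h)
    subst this
    simp [PySem.Chars.replace.go]
  | succ n ih =>
    intro l acc h
    match l with
    | [] => simp [PySem.Chars.replace.go]
    | c :: t =>
      rw [PySem.Chars.replace.go]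
      by_cases hc : c = a
      · subst hc
        have hpre : List.isPrefixOf [c] (c :: t) = true := by
          simp [List.isPrefixOf]
        rw [hpre]
        simp only [if_true]
        rw [show (List.drop [c].length (c :: t)) = t from rfl]
        rw [ih t (new.reverse ++ acc) (by simp at h ⊢; omega)]
        simp
      · have hpre : List.isPrefixOf [a] (c :: t) = false := by
          simp [List.isPrefixOf]
          exact fun hh => hc hh.symm
        rw [hpre]
        simp only [Bool.false_eq_true, if_false]
        rw [ih t (c :: acc) (by simp at h ⊢; omega)]
        simp [hc]

theorem pv_replace_single (s : List Char) (a : Char) (new : List Char) :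
    PySem.Chars.replace s [a] new = s.flatMap (fun c => if c = a then new else [c]) := by
  rw [PySem.Chars.replace]
  simp [pv_replace_single_go a new s.length s [] le_rfl]

theorem pv_replace_single_map (s : List Char) (a b : Char) :
    PySem.Chars.replace s [a] [b] = s.map (fun c => if c = a then b else c) := by
  rw [pv_replace_single]
  induction s with
  | nil => simp
  | cons c t ih => by_cases hc : c = a <;> simp [hc, ih]

-- the character map performed by A's four replace passes (space, dash, dot, colon → '_')
def pvF (c : Char) : Char :=
  if (if (if (if c = ' ' then '_' else c) = '-' then '_' else (if c = ' ' then '_' else c)) = '.'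
      then '_' else (if (if c = ' ' then '_' else c) = '-' then '_' else (if c = ' ' then '_' else c))) = ':'
  then '_'
  else (if (if (if c = ' ' then '_' else c) = '-' then '_' else (if c = ' ' then '_' else c)) = '.'
        then '_' else (if (if c = ' ' then '_' else c) = '-' then '_' else (if c = ' ' then '_' else c)))

theorem pv_four_replaces (s : List Char) :
    PySem.Chars.replace (PySem.Chars.replace (PySem.Chars.replace (PySem.Chars.replace s
      [' '] ['_']) ['-'] ['_']) ['.'] ['_']) [':'] ['_'] = s.map pvF := by
  rw [pv_replace_single_map, pv_replace_single_map, pv_replace_single_map, pv_replace_single_map]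
  simp only [List.map_map]
  rfl

-- A's keep-predicate
def pvP (c : Char) : Bool := PySem.Chars.isalnum c || c == '_'

theorem pv_join_nil (l : List (List Char)) : PySem.Chars.join [] l = l.flatten := by
  induction l with
  | nil => rfl
  | cons a t ih =>
    match t with
    | [] => simp [PySem.Chars.join, List.intercalate]
    | b :: t' =>
      rw [PySem.Chars.join, List.intercalate] at ih ⊢
      rw [List.intersperse_cons₂, List.flatten_cons, List.flatten_cons, ih]
      simp

theorem pv_join_filter (s : List Char) :
    PySem.Chars.join [] (s.map (fun c => if PySem.Chars.isalnum c || c == '_' then [c] else [])) =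
      s.filter pvP := by
  rw [pv_join_nil]
  induction s with
  | nil => rfl
  | cons c t ih =>
    simp only [List.map_cons, List.flatten_cons, List.filter_cons]
    by_cases hc : (PySem.Chars.isalnum c || c == '_') = true
    · simp only [hc, if_true, show pvP c = true from hc, List.cons_append, List.nil_append, ih]
    · simp only [hc, Bool.false_eq_true, if_false, show pvP c = false from by simpa [pvP] using hc,
        List.nil_append, ih]

-- collapse-to-canonical: pvDedup collapses every run of underscores to one
def pvDedup : List Char → List Char
  | [] => []
  | [c] => [c]
  | c :: d :: t => if c = '_' ∧ d = '_' then pvDedup (d :: t) else c :: pvDedup (d :: t)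
termination_by s => s.length

theorem pvDedup_cons_ne (c : Char) (hc : c ≠ '_') (xs : List Char) :
    pvDedup (c :: xs) = c :: pvDedup xs := by
  match xs with
  | [] => simp [pvDedup]
  | d :: t =>
    rw [pvDedup]
    simp [hc]

theorem pvDedup_cons_us_us (t : List Char) :
    pvDedup ('_' :: '_' :: t) = pvDedup ('_' :: t) := by
  rw [pvDedup]
  simp

theorem pv_no_infix_dedup (s : List Char) (h : ¬ (['_','_'] <:+: s)) : pvDedup s = s := by
  fun_induction pvDedup s with
  | case1 => rfl
  | case2 c => rfl
  | case3 c d t hcd ih =>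
    exact absurd (List.infix_cons_iff.mpr (Or.inl (by
      rw [List.cons_prefix_cons]
      exact ⟨hcd.1.symm, by rw [List.cons_prefix_cons]; exact ⟨hcd.2.symm, List.nil_prefix⟩⟩))) h
  | case4 c d t hcd ih =>
    rw [ih (fun h2 => h (h2.trans (List.suffix_cons c (d :: t)).isInfix))]

theorem pv_dedup_rep (n : Nat) : ∀ s : List Char, s.length ≤ n →
    pvDedup (pvRep s) = pvDedup s ∧ pvDedup ('_' :: pvRep s) = pvDedup ('_' :: s) := by
  induction n with
  | zero =>
    intro s h
    have : s = [] := List.eq_nil_of_length_eq_zero (Nat.le_zero.mp h)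
    subst this
    exact ⟨by simp [pvRep], by simp [pvRep]⟩
  | succ n ih =>
    intro s h
    match s with
    | [] => exact ⟨by simp [pvRep], by simp [pvRep]⟩
    | [c] => exact ⟨by simp [pvRep], by simp [pvRep]⟩
    | c :: d :: t =>
      by_cases hcd : c = '_' ∧ d = '_'
      · obtain ⟨rfl, rfl⟩ := hcd
        have ht : t.length ≤ n := by simp at h; omega
        have hrep : pvRep ('_' :: '_' :: t) = '_' :: pvRep t := by rw [pvRep]; simp
        constructor
        · rw [hrep, pvDedup_cons_us_us, (ih t ht).2]
        · rw [hrep, pvDedup_cons_us_us, pvDedup_cons_us_us, pvDedup_cons_us_us, (ih t ht).2]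
      · have hrep : pvRep (c :: d :: t) = c :: pvRep (d :: t) := by rw [pvRep]; simp [hcd]
        have hdt : (d :: t).length ≤ n := by simp at h ⊢; omega
        by_cases hc : c = '_'
        · subst hc
          have hd : d ≠ '_' := fun hd => hcd ⟨rfl, hd⟩
          have hrepdt : pvRep (d :: t) = d :: pvRep t := by
            match t with
            | [] => simp [pvRep]
            | e :: t' => rw [pvRep]; simp [hd]
          have ht : t.length ≤ n := by simp at h; omega
          have peel : ∀ xs : List Char, pvDedup ('_' :: d :: xs) = '_' :: d :: pvDedup xs := by
            intro xs
            rw [show pvDedup ('_' :: d :: xs) = '_' :: pvDedup (d :: xs) from by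
                rw [pvDedup]; simp [hd],
              pvDedup_cons_ne _ hd]
          constructor
          · rw [hrep, hrepdt, peel (pvRep t), peel t, (ih t ht).1]
          · rw [hrep, hrepdt, pvDedup_cons_us_us, pvDedup_cons_us_us, peel (pvRep t), peel t,
              (ih t ht).1]
        · have peelc : ∀ xs : List Char, pvDedup ('_' :: c :: xs) = '_' :: c :: pvDedup xs := by
            intro xs
            rw [show pvDedup ('_' :: c :: xs) = '_' :: pvDedup (c :: xs) from by
                rw [pvDedup]; simp [hc],
              pvDedup_cons_ne _ hc]
          constructor
          · rw [hrep, pvDedup_cons_ne _ hc, pvDedup_cons_ne _ hc, (ih (d :: t) hdt).1]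
          · rw [hrep, peelc (pvRep (d :: t)), peelc (d :: t), (ih (d :: t) hdt).1]

theorem pv_collapse_eq_dedup (s : List Char) : pvCollapse s = pvDedup s := by
  fun_induction pvCollapse s with
  | case1 s h ih =>
    rw [ih, pv_replace_underscore]
    exact (pv_dedup_rep s.length s le_rfl).1
  | case2 s h =>
    have hno : ¬ (['_','_'] <:+: s) := fun hin =>
      h ((PySem.Chars.isIn_iff_infix _ _).mpr hin)
    rw [pv_no_infix_dedup s hno]

-- stripping underscores, as two dropWhile passes
def pvU (c : Char) : Bool := List.contains ['_'] c

def pvRstrip (x : List Char) : List Char := (List.dropWhile pvU x.reverse).reverse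

theorem pv_strip_eq (s : List Char) :
    PySem.Chars.stripChars s ['_'] = pvRstrip (List.dropWhile pvU s) := rfl

theorem pvU_eq (c : Char) : pvU c = (c == '_') := by
  by_cases h : c = '_'
  · subst h; decide
  · rw [beq_eq_false_iff_ne.mpr h]
    simpa [pvU] using h

theorem pvRstrip_cons (c : Char) (t : List Char) :
    pvRstrip (c :: t) =
      if pvRstrip t = [] then (if pvU c then [] else [c]) else c :: pvRstrip t := by
  unfold pvRstrip
  rw [List.reverse_cons, List.dropWhile_append]
  by_cases h : List.dropWhile pvU t.reverse = []
  · simp only [h, List.isEmpty_nil, List.reverse_nil, if_true]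
    cases hc : pvU c <;> simp [List.dropWhile, hc]
  · have h' : (List.dropWhile pvU t.reverse).isEmpty = false := by
      simpa [List.isEmpty_iff] using h
    have h'' : ¬ ((List.dropWhile pvU t.reverse).reverse = []) := by
      simpa [List.reverse_eq_nil_iff] using h
    simp only [h', Bool.false_eq_true, if_false, List.reverse_append, List.reverse_singleton,
      List.singleton_append, h'', if_false]

-- B's scan, recursively: pvE = scan when output is already non-empty, pvS = scan from empty output
def pvE : Bool → List Char → List Char
  | _, [] => []
  | p, c :: t =>
    if PySem.Chars.isalnum c then
      (if p then '_' :: c :: pvE false t else c :: pvE false t)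
    else if PySem.Chars.isIn [c] [' ', '-', '.', ':', '_'] then pvE true t
    else pvE p t

def pvS : List Char → List Char
  | [] => []
  | c :: t => if PySem.Chars.isalnum c then c :: pvE false t else pvS t

theorem pv_foldl_E (t : List Char) : ∀ (out : List Char) (p : Bool), out ≠ [] →
    (t.foldl pvScanStep (out, p)).1 = out ++ pvE p t := by
  induction t with
  | nil => intro out p _; simp [pvE]
  | cons c t ih =>
    intro out p hout
    rw [List.foldl_cons]
    by_cases ha : PySem.Chars.isalnum c = true
    · have hne : out.isEmpty = false := by simpa [List.isEmpty_iff] using hout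
      rw [show pvScanStep (out, p) c =
          ((if p then out ++ ['_'] else out) ++ [c], false) from by
        simp [pvScanStep, ha, hne]]
      rw [ih _ false (by cases p <;> simp)]
      cases p <;> simp [pvE, ha]
    · by_cases hin : PySem.Chars.isIn [c] [' ', '-', '.', ':', '_'] = true
      · rw [show pvScanStep (out, p) c = (out, true) from by simp [pvScanStep, ha, hin]]
        rw [ih out true hout]
        simp [pvE, ha, hin]
      · rw [show pvScanStep (out, p) c = (out, p) from by simp [pvScanStep, ha, hin]]
        rw [ih out p hout]
        simp [pvE, ha, hin]

theorem pv_foldl_S (t : List Char) : ∀ (p : Bool), (t.foldl pvScanStep ([], p)).1 = pvS t := by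
  induction t with
  | nil => intro p; simp [pvS]
  | cons c t ih =>
    intro p
    rw [List.foldl_cons]
    by_cases ha : PySem.Chars.isalnum c = true
    · rw [show pvScanStep ([], p) c = ([c], false) from by simp [pvScanStep, ha]]
      rw [pv_foldl_E t [c] false (by simp)]
      simp [pvS, ha]
    · by_cases hin : PySem.Chars.isIn [c] [' ', '-', '.', ':', '_'] = true
      · rw [show pvScanStep ([], p) c = ([], true) from by simp [pvScanStep, ha, hin]]
        rw [ih true]
        simp [pvS, ha]
      · rw [show pvScanStep ([], p) c = ([], p) from by simp [pvScanStep, ha, hin]]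
        rw [ih p]
        simp [pvS, ha]

theorem pv_alnum_us : PySem.Chars.isalnum '_' = false := by decide

theorem pv_K (t : List Char) (halpha : ∀ c ∈ t, pvP c = true) :
    pvE false t = pvDedup (pvRstrip t) ∧
    pvE true t = (if pvRstrip t = [] then [] else pvDedup ('_' :: pvRstrip t)) := by
  induction t with
  | nil => exact ⟨by simp [pvE, pvRstrip, pvDedup], by simp [pvE, pvRstrip]⟩
  | cons c t ih =>
    have hc := halpha c (List.mem_cons_self)
    have ih := ih (fun d hd => halpha d (List.mem_cons_of_mem c hd))
    by_cases ha : PySem.Chars.isalnum c = true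
    · have hcu : c ≠ '_' := fun e => by rw [e] at ha; rw [pv_alnum_us] at ha; exact absurd ha (by simp)
      have hu : pvU c = false := by rw [pvU_eq]; simpa using hcu
      rw [pvRstrip_cons]
      constructor
      · rw [show pvE false (c :: t) = c :: pvE false t from by simp [pvE, ha]]
        by_cases hnil : pvRstrip t = []
        · rw [if_pos hnil, hu]
          simp only [Bool.false_eq_true, if_false]
          rw [show pvDedup [c] = [c] from by simp [pvDedup], ih.1, hnil]
          simp [pvDedup]
        · rw [if_neg hnil, pvDedup_cons_ne c hcu, ih.1]
      · rw [show pvE true (c :: t) = '_' :: c :: pvE false t from by simp [pvE, ha]]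
        have hpeel : ∀ xs : List Char, pvDedup ('_' :: c :: xs) = '_' :: c :: pvDedup xs := by
          intro xs
          rw [show pvDedup ('_' :: c :: xs) = '_' :: pvDedup (c :: xs) from by
              rw [pvDedup]; simp [hcu],
            pvDedup_cons_ne c hcu]
        by_cases hnil : pvRstrip t = []
        · rw [if_pos hnil, hu]
          simp only [Bool.false_eq_true, if_false]
          rw [if_neg (List.cons_ne_nil c []), hpeel [], ih.1, hnil]
        · rw [if_neg hnil, if_neg (List.cons_ne_nil c (pvRstrip t)), hpeel (pvRstrip t), ih.1]
    · have hc' : c = '_' := by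
        have hthis : (PySem.Chars.isalnum c || c == '_') = true := hc
        have ha' : PySem.Chars.isalnum c = false := by simpa using ha
        rw [ha'] at hthis
        simpa using hthis
      subst hc'
      have hin : PySem.Chars.isIn ['_'] [' ', '-', '.', ':', '_'] = true := by decide
      have hu : pvU '_' = true := by rw [pvU_eq]; simp
      rw [pvRstrip_cons]
      constructor
      · rw [show pvE false ('_' :: t) = pvE true t from by simp [pvE, pv_alnum_us, hin]]
        by_cases hnil : pvRstrip t = []
        · rw [if_pos hnil, if_pos hu, ih.2, if_pos hnil]
          simp [pvDedup]
        · rw [if_neg hnil, ih.2, if_neg hnil]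
      · rw [show pvE true ('_' :: t) = pvE true t from by simp [pvE, pv_alnum_us, hin]]
        by_cases hnil : pvRstrip t = []
        · rw [if_pos hnil, if_pos hu, if_pos rfl, ih.2, if_pos hnil]
        · rw [if_neg hnil, if_neg (List.cons_ne_nil '_' (pvRstrip t)), pvDedup_cons_us_us, ih.2,
            if_neg hnil]

theorem pv_S_strip (t : List Char) (halpha : ∀ c ∈ t, pvP c = true) :
    pvDedup (pvRstrip (List.dropWhile pvU t)) = pvS t := by
  induction t with
  | nil => simp [pvRstrip, pvDedup, pvS]
  | cons c t ih =>
    have hc := halpha c (List.mem_cons_self)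
    have ih := ih (fun d hd => halpha d (List.mem_cons_of_mem c hd))
    by_cases ha : PySem.Chars.isalnum c = true
    · have hcu : c ≠ '_' := fun e => by rw [e] at ha; rw [pv_alnum_us] at ha; exact absurd ha (by simp)
      have hu : pvU c = false := by rw [pvU_eq]; simpa using hcu
      rw [List.dropWhile_cons_of_neg (by simp [hu]), pvRstrip_cons]
      rw [show pvS (c :: t) = c :: pvE false t from by simp [pvS, ha]]
      by_cases hnil : pvRstrip t = []
      · rw [if_pos hnil, hu]
        simp only [Bool.false_eq_true, if_false]
        rw [show pvDedup [c] = [c] from by simp [pvDedup]]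
        have hK := (pv_K t (fun d hd => halpha d (List.mem_cons_of_mem c hd))).1
        rw [hK, hnil]
        simp [pvDedup]
      · rw [if_neg hnil, pvDedup_cons_ne c hcu]
        rw [(pv_K t (fun d hd => halpha d (List.mem_cons_of_mem c hd))).1]
    · have hc' : c = '_' := by
        have hthis : (PySem.Chars.isalnum c || c == '_') = true := hc
        have ha' : PySem.Chars.isalnum c = false := by simpa using ha
        rw [ha'] at hthis
        simpa using hthis
      subst hc'
      rw [List.dropWhile_cons_of_pos (by rw [pvU_eq]; simp)]
      rw [show pvS ('_' :: t) = pvS t from by simp [pvS, pv_alnum_us]]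
      exact ih

-- per-character commutation between B's raw scan and A's map+filter normal form
theorem pv_step_char (st : List Char × Bool) (c : Char) :
    pvScanStep st c = if pvP (pvF c) = true then pvScanStep st (pvF c) else st := by
  by_cases ha : PySem.Chars.isalnum c = true
  · have h1 : c ≠ ' ' := fun e => by rw [e] at ha; exact absurd ha (by decide)
    have h2 : c ≠ '-' := fun e => by rw [e] at ha; exact absurd ha (by decide)
    have h3 : c ≠ '.' := fun e => by rw [e] at ha; exact absurd ha (by decide)
    have h4 : c ≠ ':' := fun e => by rw [e] at ha; exact absurd ha (by decide)
    have hf : pvF c = c := by simp [pvF, h1, h2, h3, h4]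
    rw [hf, if_pos (show pvP c = true by simp [pvP, ha])]
  · by_cases h1 : c = ' '
    · subst h1; rw [show pvF ' ' = '_' from by decide, if_pos (show pvP '_' = true by decide)]
      simp [pvScanStep, ha, pv_alnum_us, show PySem.Chars.isIn [' '] [' ', '-', '.', ':', '_'] = true from by decide,
        show PySem.Chars.isIn ['_'] [' ', '-', '.', ':', '_'] = true from by decide]
    · by_cases h2 : c = '-'
      · subst h2; rw [show pvF '-' = '_' from by decide, if_pos (show pvP '_' = true by decide)]
        simp [pvScanStep, ha, pv_alnum_us, show PySem.Chars.isIn ['-'] [' ', '-', '.', ':', '_'] = true from by decide,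
          show PySem.Chars.isIn ['_'] [' ', '-', '.', ':', '_'] = true from by decide]
      · by_cases h3 : c = '.'
        · subst h3; rw [show pvF '.' = '_' from by decide, if_pos (show pvP '_' = true by decide)]
          simp [pvScanStep, ha, pv_alnum_us, show PySem.Chars.isIn ['.'] [' ', '-', '.', ':', '_'] = true from by decide,
            show PySem.Chars.isIn ['_'] [' ', '-', '.', ':', '_'] = true from by decide]
        · by_cases h4 : c = ':'
          · subst h4; rw [show pvF ':' = '_' from by decide, if_pos (show pvP '_' = true by decide)]
            simp [pvScanStep, ha, pv_alnum_us, show PySem.Chars.isIn [':'] [' ', '-', '.', ':', '_'] = true from by decide,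
              show PySem.Chars.isIn ['_'] [' ', '-', '.', ':', '_'] = true from by decide]
          · by_cases h5 : c = '_'
            · subst h5; rw [show pvF '_' = '_' from by decide, if_pos (show pvP '_' = true by decide)]
            · have hf : pvF c = c := by simp [pvF, h1, h2, h3, h4]
              have hp : pvP c = false := by simp [pvP, ha, h5]
              rw [hf, if_neg (show ¬ pvP c = true by simp [hp])]
              have hnin : PySem.Chars.isIn [c] [' ', '-', '.', ':', '_'] = false := by
                rcases hb : PySem.Chars.isIn [c] [' ', '-', '.', ':', '_'] with _ | _
                · rfl
                · have hmem : c ∈ [' ', '-', '.', ':', '_'] :=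
                    ((PySem.Chars.isIn_iff_infix _ _).mp hb).sublist.subset (List.mem_singleton.mpr rfl)
                  simp at hmem
                  rcases hmem with h | h | h | h | h <;> first
                    | exact absurd h h1 | exact absurd h h2 | exact absurd h h3
                    | exact absurd h h4 | exact absurd h h5
              simp [pvScanStep, ha, hnin]

theorem pv_foldl_filter (s : List Char) : ∀ st : List Char × Bool,
    s.foldl pvScanStep st = ((s.map pvF).filter pvP).foldl pvScanStep st := by
  induction s with
  | nil => intro st; rfl
  | cons c t ih =>
    intro st
    rw [List.map_cons, List.filter_cons, List.foldl_cons, pv_step_char st c]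
    by_cases hp : pvP (pvF c) = true
    · rw [if_pos hp, if_pos hp, List.foldl_cons, ih]
    · rw [if_neg hp, if_neg hp, ih]

theorem pv_pipeline (s : List Char) :
    pvCollapse (PySem.Chars.stripChars
      (PySem.Chars.join []
        ((PySem.Chars.replace (PySem.Chars.replace (PySem.Chars.replace (PySem.Chars.replace s
            [' '] ['_']) ['-'] ['_']) ['.'] ['_']) [':'] ['_']).map
          (fun c => if PySem.Chars.isalnum c || c == '_' then [c] else [])))
      ['_']) =
    PySem.Chars.join [] (((s.foldl pvScanStep ([], false)).1).map (fun c => [c])) := by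
  rw [PySem.Chars.join_nil_singletons]
  rw [pv_four_replaces, pv_join_filter (s.map pvF)]
  rw [pv_strip_eq, pv_collapse_eq_dedup]
  rw [pv_S_strip ((s.map pvF).filter pvP) (fun c hc => List.of_mem_filter hc)]
  rw [pv_foldl_filter s ([], false), pv_foldl_S]

theorem pv_main (comp ch kind : List Char) :
    channel_parts_to_entity_id_chars comp ch kind = channel_parts_to_entity_id_alt_chars comp ch kind := by
  unfold channel_parts_to_entity_id_chars channel_parts_to_entity_id_alt_chars
  dsimp only
  rw [pv_pipeline]

-- ===== VERDICT (by name: the statement is the Claim_ definition above) =====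
theorem channel_parts_to_entity_id_spec : Claim_equal_channel_parts_to_entity_id := by
  intro comp ch kind _
  unfold Spec_channel_parts_to_entity_id channel_parts_to_entity_id channel_parts_to_entity_id_alt
  rw [pv_main]
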